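-- pv_equiv track=rewrite | github.com/JustinHallquist/justinhallquistcom | competitive_programming/problems/codeforces/1680/C_Binary_String/1680_C_Binary_String.brute_force_pass.py | calc
-- ===== SOURCE A (Python) =====
-- def calc(arr, cur_zero_cost, cur_one_cost=0, left_ptr=0, right_ptr=-1):
--     if cur_zero_cost <= cur_one_cost or cur_zero_cost == 0:
--         return max(cur_zero_cost, cur_one_cost)
--
--     lv = arr[left_ptr]
--     rv = arr[right_ptr]
--
--     if lv < rv:
--         if lv == 0:
--             return calc(arr, cur_zero_cost - 1, cur_one_cost, left_ptr + 1, right_ptr)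
--         if lv == 1:
--             return calc(arr, cur_zero_cost, cur_one_cost + 1, left_ptr + 1, right_ptr)
--     elif rv < lv:
--         if rv == 0:
--             return calc(arr, cur_zero_cost - 1, cur_one_cost, left_ptr, right_ptr - 1)
--         if rv == 1:
--             return calc(arr, cur_zero_cost, cur_one_cost + 1, left_ptr, right_ptr - 1)
--     elif lv == 1:
--         return min(
--             calc(arr, cur_zero_cost, cur_one_cost + 1, left_ptr, right_ptr - 1),
--             calc(arr, cur_zero_cost, cur_one_cost + 1, left_ptr + 1, right_ptr)
--         )
--     else:
--         return min(
--             calc(arr, cur_zero_cost - 1, cur_one_cost, left_ptr, right_ptr - 1),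
--             calc(arr, cur_zero_cost - 1, cur_one_cost, left_ptr + 1, right_ptr)
--         )
-- ===== SOURCE B (Python) =====
-- def calc(arr, cur_zero_cost, cur_one_cost=0, left_ptr=0, right_ptr=-1):
--     # Bottom-up table over (left-moves, right-moves): row[a] = maximum number of
--     # zeros removable in the remaining steps from state (a, s - a).
--     if cur_zero_cost <= cur_one_cost or cur_zero_cost == 0:
--         return max(cur_zero_cost, cur_one_cost)
--     k = cur_zero_cost - cur_one_cost          # total number of removal steps
--     left = [arr[left_ptr + a] for a in range(k)]
--     right = [arr[right_ptr - b] for b in range(k)]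
--     row = [0] * (k + 1)                       # level s = k: no steps remain
--     for s in range(k - 1, -1, -1):
--         row = [cell(left, right, row, s, a) for a in range(s + 1)]
--     best = cur_zero_cost - row[0]
--     return max(best, 0) if cur_zero_cost > 0 else best
--
--
-- def cell(left, right, row, s, a):
--     lv, rv = left[a], right[s - a]
--     if lv == 0 and rv == 1:
--         return 1 + row[a + 1]                 # forced: remove the zero on the left
--     if lv == 1 and rv == 0:
--         return 1 + row[a]                     # forced: remove the zero on the right
--     return (1 if lv == 0 else 0) + max(row[a], row[a + 1])   # equal ends: free choice
-- ===== Notes on version B (the rewrite author's own statement) =====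
-- stated objective: alternative
-- what changed: Replaces the branching two-pointer recursion by a bottom-up dynamic-programming table over (left-moves, right-moves) states that computes the maximum number of removable zeros, returning cur_zero_cost minus that maximum (clamped at 0 for a positive budget).
-- outside the precondition, e.g. on calc([0, 0], 1, -2, 0, -1): A returns 0, B raises IndexError; on calc([2, 0], 1, 0, 0, -1): A returns 0, B returns 1; on calc([0, 5], 2, 0, 0, -1): A returns 0, B returns 0
import Mathlib
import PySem

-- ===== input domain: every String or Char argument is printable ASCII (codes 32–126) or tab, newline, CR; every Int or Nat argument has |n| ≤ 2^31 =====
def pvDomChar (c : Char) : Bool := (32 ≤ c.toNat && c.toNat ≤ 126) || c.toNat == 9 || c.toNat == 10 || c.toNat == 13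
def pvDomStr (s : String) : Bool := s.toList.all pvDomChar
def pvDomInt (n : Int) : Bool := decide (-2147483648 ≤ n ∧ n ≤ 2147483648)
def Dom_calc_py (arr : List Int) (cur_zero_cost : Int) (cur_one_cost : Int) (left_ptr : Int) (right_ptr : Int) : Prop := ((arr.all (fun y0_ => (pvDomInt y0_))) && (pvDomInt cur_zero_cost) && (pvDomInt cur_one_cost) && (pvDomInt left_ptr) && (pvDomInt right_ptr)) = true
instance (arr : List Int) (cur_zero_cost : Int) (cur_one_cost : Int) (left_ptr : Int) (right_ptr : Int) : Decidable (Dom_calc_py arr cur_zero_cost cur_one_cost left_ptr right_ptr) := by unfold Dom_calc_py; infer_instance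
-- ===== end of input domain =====

-- B replaces A's branching two-pointer recursion by a bottom-up table of maximum
-- removable zeros over (left-moves, right-moves) states (objective: alternative).


-- ===== PORT A =====
def calc_py (arr : List Int) (cur_zero_cost : Int) (cur_one_cost : Int) (left_ptr : Int) (right_ptr : Int) : Int :=
  if _h : cur_zero_cost ≤ cur_one_cost ∨ cur_zero_cost = 0 then
    max cur_zero_cost cur_one_cost
  else
    match PySem.List.pyGet? arr left_ptr, PySem.List.pyGet? arr right_ptr with
    | some lv, some rv =>
      if lv < rv then
        if lv = 0 then calc_py arr (cur_zero_cost - 1) cur_one_cost (left_ptr + 1) right_ptr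
        else if lv = 1 then calc_py arr cur_zero_cost (cur_one_cost + 1) (left_ptr + 1) right_ptr
        else 0  -- Python falls through and returns None here (outside Pre_)
      else if rv < lv then
        if rv = 0 then calc_py arr (cur_zero_cost - 1) cur_one_cost left_ptr (right_ptr - 1)
        else if rv = 1 then calc_py arr cur_zero_cost (cur_one_cost + 1) left_ptr (right_ptr - 1)
        else 0  -- Python falls through and returns None here (outside Pre_)
      else if lv = 1 then
        min (calc_py arr cur_zero_cost (cur_one_cost + 1) left_ptr (right_ptr - 1))
            (calc_py arr cur_zero_cost (cur_one_cost + 1) (left_ptr + 1) right_ptr)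
      else
        min (calc_py arr (cur_zero_cost - 1) cur_one_cost left_ptr (right_ptr - 1))
            (calc_py arr (cur_zero_cost - 1) cur_one_cost (left_ptr + 1) right_ptr)
    | _, _ => 0  -- Python raises IndexError here (outside Pre_)
termination_by (cur_zero_cost - cur_one_cost).toNat
decreasing_by all_goals omega

-- ===== PORT B =====
-- left = [arr[left_ptr + a] for a in range(k)]
def pvLeft (arr : List Int) (left_ptr : Int) (k : Nat) : List Int :=
  (List.range k).map (fun (a : Nat) => (PySem.List.pyGet? arr (left_ptr + (a : Int))).getD 0)
-- right = [arr[right_ptr - b] for b in range(k)]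
def pvRight (arr : List Int) (right_ptr : Int) (k : Nat) : List Int :=
  (List.range k).map (fun (b : Nat) => (PySem.List.pyGet? arr (right_ptr - (b : Int))).getD 0)
-- one level of the table: row = [cell(left, right, row, s, a) for a in range(s + 1)]
def pvStepRow (left right row : List Int) (s : Nat) : List Int :=
  (List.range (s + 1)).map (fun a =>
    let lv := left.getD a 0
    let rv := right.getD (s - a) 0
    if lv = 0 ∧ rv = 1 then 1 + row.getD (a + 1) 0
    else if lv = 1 ∧ rv = 0 then 1 + row.getD a 0
    else (if lv = 0 then 1 else 0) + max (row.getD a 0) (row.getD (a + 1) 0))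

def calc_py_alt (arr : List Int) (cur_zero_cost : Int) (cur_one_cost : Int) (left_ptr : Int) (right_ptr : Int) : Int :=
  if cur_zero_cost ≤ cur_one_cost ∨ cur_zero_cost = 0 then
    max cur_zero_cost cur_one_cost
  else
    let k := (cur_zero_cost - cur_one_cost).toNat
    let left := pvLeft arr left_ptr k
    let right := pvRight arr right_ptr k
    let row := ((List.range k).reverse).foldl (fun r s => pvStepRow left right r s)
                 (List.replicate (k + 1) (0 : Int))
    let best := cur_zero_cost - row.getD 0 0
    if 0 < cur_zero_cost then max best 0 else best

-- ===== PRECONDITION & SPEC =====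
-- Pre_ admits every trivial call and otherwise restricts to 0/1 arrays whose whole
-- k-cell window from each pointer is in range (k = cur_zero_cost - cur_one_cost);
-- outside it A may raise IndexError, fall through returning None on a non-binary
-- array, or return by luck before reaching an out-of-range cell or a non-binary branch.
def Pre_calc_py (arr : List Int) (cur_zero_cost : Int) (cur_one_cost : Int) (left_ptr : Int) (right_ptr : Int) : Prop :=
  cur_zero_cost ≤ cur_one_cost ∨ cur_zero_cost = 0 ∨
  ((∀ x ∈ arr, x = 0 ∨ x = 1) ∧
   -(arr.length : Int) ≤ left_ptr ∧
   left_ptr + (cur_zero_cost - cur_one_cost) ≤ (arr.length : Int) ∧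
   right_ptr < (arr.length : Int) ∧
   -(arr.length : Int) ≤ right_ptr - (cur_zero_cost - cur_one_cost) + 1)
instance (arr : List Int) (cur_zero_cost : Int) (cur_one_cost : Int) (left_ptr : Int) (right_ptr : Int) : Decidable (Pre_calc_py arr cur_zero_cost cur_one_cost left_ptr right_ptr) := by unfold Pre_calc_py; infer_instance
def pvWitness_calc_py : List Int × Int × Int × Int × Int := ([0, 1], 2, 0, 0, -1)

def Spec_calc_py (arr : List Int) (cur_zero_cost : Int) (cur_one_cost : Int) (left_ptr : Int) (right_ptr : Int) (out : Int) : Prop := out = calc_py_alt arr cur_zero_cost cur_one_cost left_ptr right_ptr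
instance (arr : List Int) (cur_zero_cost : Int) (cur_one_cost : Int) (left_ptr : Int) (right_ptr : Int) (out : Int) : Decidable (Spec_calc_py arr cur_zero_cost cur_one_cost left_ptr right_ptr out) := by unfold Spec_calc_py; infer_instance

-- ===== CLAIM (what is proved, stated in full; the proofs are below) =====
def Claim_equal_calc_py : Prop := ∀ (arr : List Int) (cur_zero_cost : Int) (cur_one_cost : Int) (left_ptr : Int) (right_ptr : Int), Dom_calc_py arr cur_zero_cost cur_one_cost left_ptr right_ptr → Pre_calc_py arr cur_zero_cost cur_one_cost left_ptr right_ptr → Spec_calc_py arr cur_zero_cost cur_one_cost left_ptr right_ptr (calc_py arr cur_zero_cost cur_one_cost left_ptr right_ptr)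

-- ===== LEMMAS AND PROOFS =====

-- proof-side DP value: maximum number of zeros removable from state (a, b)
def pvG (left right : List Int) (k : Nat) (a b : Nat) : Int :=
  if _h : k ≤ a + b then 0
  else
    let lv := left.getD a 0
    let rv := right.getD b 0
    if lv = 0 ∧ rv = 1 then 1 + pvG left right k (a + 1) b
    else if lv = 1 ∧ rv = 0 then 1 + pvG left right k a (b + 1)
    else (if lv = 0 then 1 else 0) + max (pvG left right k a (b + 1)) (pvG left right k (a + 1) b)
termination_by k - (a + b)
decreasing_by all_goals omega

-- number of zeros among the first a entries
def pvZ (vals : List Int) (a : Nat) : Int := ((vals.take a).countP (fun v => v = 0) : Int)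

theorem pvG_nonneg (left right : List Int) (k a b : Nat) : 0 ≤ pvG left right k a b := by
  fun_induction pvG <;> simp_all <;> omega


theorem pvZ_succ (vals : List Int) (a : Nat) (h : a < vals.length) :
    pvZ vals (a + 1) = pvZ vals a + (if vals.getD a 0 = 0 then 1 else 0) := by
  unfold pvZ
  rw [List.take_add_one, List.getElem?_eq_getElem h, List.countP_append, List.getD_eq_getElem vals 0 h]
  simp [List.countP_cons]

theorem pvStep_level (left right : List Int) (k s : Nat) (hs : s < k) (row : List Int)
    (hrow : row = (List.range (s + 2)).map (fun a => pvG left right k a (s + 1 - a))) :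
    pvStepRow left right row s = (List.range (s + 1)).map (fun a => pvG left right k a (s - a)) := by
  unfold pvStepRow
  apply List.map_congr_left
  intro a ha
  rw [List.mem_range] at ha
  have hab : a + (s - a) = s := by omega
  have hga : row.getD a 0 = pvG left right k a (s + 1 - a) := by
    subst hrow; rw [List.getD_eq_getElem?_getD]
    have h2 : a < s + 2 := by omega
    simp [h2]
  have hgb : row.getD (a + 1) 0 = pvG left right k (a + 1) (s - a) := by
    subst hrow; rw [List.getD_eq_getElem?_getD]
    have h2 : a + 1 < s + 2 := by omega
    have h3 : s + 1 - (a + 1) = s - a := by omega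
    simp [h2, h3]
  have h4 : s + 1 - a = (s - a) + 1 := by omega
  rw [pvG]
  rw [dif_neg (by omega : ¬ k ≤ a + (s - a))]
  simp only [hga, hgb, h4]

theorem pvFold (left right : List Int) (k : Nat) :
    ∀ (s : Nat), s ≤ k → ∀ row : List Int,
      row = (List.range (s + 1)).map (fun a => pvG left right k a (s - a)) →
      ((List.range s).reverse.foldl (fun r t => pvStepRow left right r t) row)
        = [pvG left right k 0 0] := by
  intro s
  induction s with
  | zero => intro _ row hrow; simpa using hrow
  | succ n ih =>
    intro hs row hrow
    rw [List.range_succ, List.reverse_append]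
    simp only [List.reverse_singleton, List.singleton_append, List.foldl_cons]
    exact ih (by omega) _ (pvStep_level left right k n (by omega) row hrow)

theorem pvMain (arr : List Int) (cz co lp rp : Int)
    (hbin : ∀ x ∈ arr, x = 0 ∨ x = 1) (hgt : co < cz)
    (hlp0 : -(arr.length : Int) ≤ lp) (hlpK : lp + (cz - co) ≤ (arr.length : Int))
    (hrp0 : rp < (arr.length : Int)) (hrpK : -(arr.length : Int) ≤ rp - (cz - co) + 1) :
    ∀ (d a b : Nat), a + b ≤ (cz - co).toNat → (cz - co).toNat - (a + b) = d →
      calc_py arr (cz - pvZ (pvLeft arr lp (cz - co).toNat) a - pvZ (pvRight arr rp (cz - co).toNat) b)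
        (co + ((a : Int) - pvZ (pvLeft arr lp (cz - co).toNat) a) + ((b : Int) - pvZ (pvRight arr rp (cz - co).toNat) b))
        (lp + (a : Int)) (rp - (b : Int))
      = (if 0 ≤ cz - pvZ (pvLeft arr lp (cz - co).toNat) a - pvZ (pvRight arr rp (cz - co).toNat) b then
           max (cz - pvZ (pvLeft arr lp (cz - co).toNat) a - pvZ (pvRight arr rp (cz - co).toNat) b
                  - pvG (pvLeft arr lp (cz - co).toNat) (pvRight arr rp (cz - co).toNat) (cz - co).toNat a b) 0
         else cz - pvZ (pvLeft arr lp (cz - co).toNat) a - pvZ (pvRight arr rp (cz - co).toNat) b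
                  - pvG (pvLeft arr lp (cz - co).toNat) (pvRight arr rp (cz - co).toNat) (cz - co).toNat a b) := by
  set k := (cz - co).toNat with hkdef
  set L := pvLeft arr lp k with hLdef
  set R := pvRight arr rp k with hRdef
  have hk : (k : Int) = cz - co := by omega
  have hLlen : L.length = k := by simp [hLdef, pvLeft]
  have hRlen : R.length = k := by simp [hRdef, pvRight]
  have hLgetD : ∀ a : Nat, a < k → L.getD a 0 = (PySem.List.pyGet? arr (lp + (a : Int))).getD 0 := by
    intro a ha
    rw [hLdef]; unfold pvLeft
    rw [List.getD_eq_getElem?_getD, List.getElem?_map, List.getElem?_range ha]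
    rfl
  have hRgetD : ∀ b : Nat, b < k → R.getD b 0 = (PySem.List.pyGet? arr (rp - (b : Int))).getD 0 := by
    intro b hb
    rw [hRdef]; unfold pvRight
    rw [List.getD_eq_getElem?_getD, List.getElem?_map, List.getElem?_range hb]
    rfl
  have hLget : ∀ a : Nat, a < k → PySem.List.pyGet? arr (lp + (a : Int)) = some (L.getD a 0) := by
    intro a ha
    obtain ⟨v, hv⟩ : ∃ v, PySem.List.pyGet? arr (lp + (a : Int)) = some v := by
      cases hE : PySem.List.pyGet? arr (lp + (a : Int)) with
      | none =>
        rw [PySem.List.pyGet?_eq_none_iff] at hE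
        exact absurd (by unfold PySem.Raise.InRange; omega) hE
      | some v => exact ⟨v, rfl⟩
    rw [hv, hLgetD a ha, hv]
    rfl
  have hRget : ∀ b : Nat, b < k → PySem.List.pyGet? arr (rp - (b : Int)) = some (R.getD b 0) := by
    intro b hb
    obtain ⟨v, hv⟩ : ∃ v, PySem.List.pyGet? arr (rp - (b : Int)) = some v := by
      cases hE : PySem.List.pyGet? arr (rp - (b : Int)) with
      | none =>
        rw [PySem.List.pyGet?_eq_none_iff] at hE
        exact absurd (by unfold PySem.Raise.InRange; omega) hE
      | some v => exact ⟨v, rfl⟩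
    rw [hv, hRgetD b hb, hv]
    rfl
  have hLbin : ∀ a : Nat, a < k → L.getD a 0 = 0 ∨ L.getD a 0 = 1 := by
    intro a ha
    exact hbin _ (PySem.List.mem_of_pyGet?_eq_some _ (hLget a ha))
  have hRbin : ∀ b : Nat, b < k → R.getD b 0 = 0 ∨ R.getD b 0 = 1 := by
    intro b hb
    exact hbin _ (PySem.List.mem_of_pyGet?_eq_some _ (hRget b hb))
  intro d
  induction d with
  | zero =>
    intro a b hab hd
    have hs : a + b = k := by omega
    have hcz : cz - pvZ L a - pvZ R b ≤ co + ((a : Int) - pvZ L a) + ((b : Int) - pvZ R b) := by omega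
    rw [calc_py]
    rw [dif_pos (Or.inl hcz)]
    rw [pvG, dif_pos (by omega : k ≤ a + b)]
    have : co + ((a : Int) - pvZ L a) + ((b : Int) - pvZ R b) = cz - pvZ L a - pvZ R b := by omega
    rw [this]
    split <;> omega
  | succ n ih =>
    intro a b hab hd
    have hs : a + b < k := by omega
    by_cases hz : cz - pvZ L a - pvZ R b = 0
    · -- zero-budget early stop
      rw [calc_py, dif_pos (Or.inr hz)]
      rw [hz]
      have hg := pvG_nonneg L R k a b
      have hcop : co + ((a : Int) - pvZ L a) + ((b : Int) - pvZ R b) < 0 := by omega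
      split <;> omega
    · -- genuine step
      have hnb : ¬ (cz - pvZ L a - pvZ R b ≤ co + ((a : Int) - pvZ L a) + ((b : Int) - pvZ R b)
                    ∨ cz - pvZ L a - pvZ R b = 0) := by
        rintro (h1 | h2)
        · omega
        · exact hz h2
      rw [calc_py, dif_neg hnb]
      rw [hLget a (by omega), hRget b (by omega)]
      have hZla := pvZ_succ L a (by omega)
      have hZrb := pvZ_succ R b (by omega)
      rw [pvG, dif_neg (by omega : ¬ k ≤ a + b)]
      have hga := pvG_nonneg L R k (a + 1) b
      have hgb := pvG_nonneg L R k a (b + 1)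
      rcases hLbin a (by omega) with hl | hl <;> rcases hRbin b (by omega) with hr | hr <;>
        rw [hl] at hZla ⊢ <;> rw [hr] at hZrb ⊢ <;>
        norm_num at hZla hZrb ⊢
      · -- lv = 0, rv = 0 : equal ends, zero consumed
        have IH1 := ih a (b + 1) (by omega) (by omega)
        have IH2 := ih (a + 1) b (by omega) (by omega)
        rw [hZla] at IH2; rw [hZrb] at IH1
        push_cast at IH1 IH2
        have e1 : cz - (pvZ L a + 1) - pvZ R b = cz - pvZ L a - pvZ R b - 1 := by ring
        have e2 : cz - pvZ L a - (pvZ R b + 1) = cz - pvZ L a - pvZ R b - 1 := by ring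
        have e3 : co + ((a : Int) + 1 - (pvZ L a + 1)) + ((b : Int) - pvZ R b)
                = co + ((a : Int) - pvZ L a) + ((b : Int) - pvZ R b) := by ring
        have e4 : co + ((a : Int) - pvZ L a) + ((b : Int) + 1 - (pvZ R b + 1))
                = co + ((a : Int) - pvZ L a) + ((b : Int) - pvZ R b) := by ring
        have e5 : lp + ((a : Int) + 1) = lp + (a : Int) + 1 := by ring
        have e6 : rp - ((b : Int) + 1) = rp - (b : Int) - 1 := by ring
        rw [e2, e4, e6] at IH1
        rw [e1, e3, e5] at IH2
        rw [IH1, IH2]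
        simp only [max_def, min_def]
        split_ifs <;> omega
      · -- lv = 0, rv = 1 : forced left move
        have IH2 := ih (a + 1) b (by omega) (by omega)
        rw [hZla] at IH2
        push_cast at IH2
        have e1 : cz - (pvZ L a + 1) - pvZ R b = cz - pvZ L a - pvZ R b - 1 := by ring
        have e3 : co + ((a : Int) + 1 - (pvZ L a + 1)) + ((b : Int) - pvZ R b)
                = co + ((a : Int) - pvZ L a) + ((b : Int) - pvZ R b) := by ring
        have e5 : lp + ((a : Int) + 1) = lp + (a : Int) + 1 := by ring
        rw [e1, e3, e5] at IH2
        rw [IH2]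
        simp only [max_def]
        split_ifs <;> omega
      · -- lv = 1, rv = 0 : forced right move
        have IH1 := ih a (b + 1) (by omega) (by omega)
        rw [hZrb] at IH1
        push_cast at IH1
        have e2 : cz - pvZ L a - (pvZ R b + 1) = cz - pvZ L a - pvZ R b - 1 := by ring
        have e4 : co + ((a : Int) - pvZ L a) + ((b : Int) + 1 - (pvZ R b + 1))
                = co + ((a : Int) - pvZ L a) + ((b : Int) - pvZ R b) := by ring
        have e6 : rp - ((b : Int) + 1) = rp - (b : Int) - 1 := by ring
        rw [e2, e4, e6] at IH1
        rw [IH1]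
        simp only [max_def]
        split_ifs <;> omega
      · -- lv = 1, rv = 1 : equal ends, one consumed
        have IH1 := ih a (b + 1) (by omega) (by omega)
        have IH2 := ih (a + 1) b (by omega) (by omega)
        rw [hZla] at IH2; rw [hZrb] at IH1
        push_cast at IH1 IH2
        have e4 : co + ((a : Int) - pvZ L a) + ((b : Int) + 1 - pvZ R b)
                = co + ((a : Int) - pvZ L a) + ((b : Int) - pvZ R b) + 1 := by ring
        have e3 : co + ((a : Int) + 1 - pvZ L a) + ((b : Int) - pvZ R b)
                = co + ((a : Int) - pvZ L a) + ((b : Int) - pvZ R b) + 1 := by ring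
        have e5 : lp + ((a : Int) + 1) = lp + (a : Int) + 1 := by ring
        have e6 : rp - ((b : Int) + 1) = rp - (b : Int) - 1 := by ring
        rw [e4, e6] at IH1
        rw [e3, e5] at IH2
        rw [IH1, IH2]
        simp only [max_def, min_def]
        split_ifs <;> omega

-- ===== VERDICT (by name: the statement is the Claim_ definition above) =====
theorem calc_py_spec : Claim_equal_calc_py := by
  intro arr cz co lp rp hdom hpre
  unfold Spec_calc_py
  by_cases hbase : cz ≤ co ∨ cz = 0
  · rw [calc_py, dif_pos hbase]
    unfold calc_py_alt
    rw [if_pos hbase]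
  · have hb2 : (∀ x ∈ arr, x = 0 ∨ x = 1) ∧
        -(arr.length : Int) ≤ lp ∧ lp + (cz - co) ≤ (arr.length : Int) ∧
        rp < (arr.length : Int) ∧ -(arr.length : Int) ≤ rp - (cz - co) + 1 := by
      rcases hpre with h | h | h
      · exact absurd (Or.inl h) hbase
      · exact absurd (Or.inr h) hbase
      · exact h
    obtain ⟨hbin, hlp0, hlpK, hrp0, hrpK⟩ := hb2
    have hgt : co < cz := by
      rcases not_or.mp hbase with ⟨h1, _⟩; omega
    set k := (cz - co).toNat with hkdef
    have hk : (k : Int) = cz - co := by omega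
    have hA := pvMain arr cz co lp rp hbin hgt hlp0 hlpK hrp0 hrpK k 0 0 (by omega) (by omega)
    norm_num [pvZ] at hA
    have hrep : List.replicate (k + 1) (0 : Int)
        = (List.range (k + 1)).map (fun a => pvG (pvLeft arr lp k) (pvRight arr rp k) k a (k - a)) := by
      symm
      rw [List.eq_replicate_iff]
      refine ⟨by simp, ?_⟩
      intro x hx
      rcases List.mem_map.mp hx with ⟨a, ha, hax⟩
      rw [List.mem_range] at ha
      rw [pvG, dif_pos (by omega : k ≤ a + (k - a))] at hax
      exact hax.symm
    have hfold := pvFold (pvLeft arr lp k) (pvRight arr rp k) k k le_rfl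
      (List.replicate (k + 1) (0 : Int)) hrep
    show calc_py arr cz co lp rp
      = (if cz ≤ co ∨ cz = 0 then max cz co else
          let k' := (cz - co).toNat
          let left := pvLeft arr lp k'
          let right := pvRight arr rp k'
          let row := ((List.range k').reverse).foldl (fun r s => pvStepRow left right r s)
                       (List.replicate (k' + 1) (0 : Int))
          let best := cz - row.getD 0 0
          if 0 < cz then max best 0 else best)
    rw [if_neg hbase]
    simp only [← hkdef] at hA ⊢
    rw [hfold]
    simp only [List.getD_cons_zero]
    rw [hA]
    split_ifs <;> omega
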